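-- pv_equiv track=rewrite | github.com/jeromeboivin/pythonic | pythonic/po32_codec.py | _find_data_start
-- ===== SOURCE A (Python) =====
-- from typing import List, Dict, Optional, Tuple, Any
--
-- def _find_data_start(groups: List[int], min_preamble: int = 20) -> Optional[int]:
--     preamble_count = 0
--     for i, g in enumerate(groups):
--         if 8 <= g <= 12:
--             preamble_count += 1
--         else:
--             if preamble_count >= min_preamble:
--                 return i
--             preamble_count = 0
--     return None
-- ===== SOURCE B (Python) =====
-- from typing import List, Optional
--
-- def _find_data_start(groups: List[int], min_preamble: int = 20) -> Optional[int]: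
--     # Stateless window scan: instead of carrying a running run counter, test each
--     # candidate index directly against the fixed-size window just before it.
--     m = max(min_preamble, 0)
--     for i, g in enumerate(groups):
--         if not (8 <= g <= 12) and i >= m and all(8 <= x <= 12 for x in groups[i - m:i]):
--             return i
--     return None
-- ===== Notes on version B (the rewrite author's own statement) =====
-- stated objective: alternative
-- what changed: Replaces A's stateful scan that carries a running preamble counter (incremented/reset per element) by a stateless per-candidate check: for each non-preamble index i, directly test the fixed window groups[i-m:i] with all(), so no run state is maintained across iterations.
import Mathlib
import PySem

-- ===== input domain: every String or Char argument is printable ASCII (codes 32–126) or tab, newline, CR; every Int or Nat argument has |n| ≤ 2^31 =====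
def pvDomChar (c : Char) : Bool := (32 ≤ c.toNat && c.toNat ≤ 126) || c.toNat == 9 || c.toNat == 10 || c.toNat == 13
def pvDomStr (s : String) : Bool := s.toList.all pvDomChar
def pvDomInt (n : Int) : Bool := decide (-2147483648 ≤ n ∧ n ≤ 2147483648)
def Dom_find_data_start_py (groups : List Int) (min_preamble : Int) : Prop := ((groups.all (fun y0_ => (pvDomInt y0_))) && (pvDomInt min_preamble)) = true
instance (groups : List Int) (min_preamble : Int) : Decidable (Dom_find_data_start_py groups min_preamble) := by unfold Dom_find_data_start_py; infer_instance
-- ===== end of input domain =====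

-- B replaces A's stateful running-counter scan by a stateless per-candidate window check
-- (test the m elements just before each non-preamble index via a slice); alternative, same result.

-- ===== PORT A =====
-- the loop over enumerate(groups): i = current index, cnt = preamble_count
def fdsA_loop (minp : Int) : List Int → Int → Int → Option Int
  | [], _, _ => none
  | g :: rest, i, cnt =>
    if 8 ≤ g ∧ g ≤ 12 then fdsA_loop minp rest (i + 1) (cnt + 1)
    else if minp ≤ cnt then some i
    else fdsA_loop minp rest (i + 1) 0

def find_data_start_py (groups : List Int) (min_preamble : Int) : Option Int :=
  fdsA_loop min_preamble groups 0 0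

-- ===== PORT B =====
-- the predicate 8 <= x <= 12
def fdsPreB (g : Int) : Bool := decide (8 ≤ g ∧ g ≤ 12)

-- the loop over enumerate(groups): i = current index; condition is
-- 'not (8 <= g <= 12) and i >= m and all(pre for x in groups[i-m:i])'
def fdsB_loop (groups : List Int) (m : Int) : List Int → Int → Option Int
  | [], _ => none
  | g :: rest, i =>
    if (!fdsPreB g && decide (m ≤ i)
        && (PySem.List.slice groups (some (i - m)) (some i)).all fdsPreB) = true
    then some i
    else fdsB_loop groups m rest (i + 1)

def find_data_start_py_alt (groups : List Int) (min_preamble : Int) : Option Int :=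
  fdsB_loop groups (max min_preamble 0) groups 0

-- ===== PRECONDITION & SPEC =====
def Spec_find_data_start_py (groups : List Int) (min_preamble : Int) (out : Option Int) : Prop := out = find_data_start_py_alt groups min_preamble
instance (groups : List Int) (min_preamble : Int) (out : Option Int) : Decidable (Spec_find_data_start_py groups min_preamble out) := by unfold Spec_find_data_start_py; infer_instance

-- ===== CLAIM (what is proved, stated in full; the proofs are below) =====
def Claim_equal_find_data_start_py : Prop := ∀ (groups : List Int) (min_preamble : Int), Dom_find_data_start_py groups min_preamble → Spec_find_data_start_py groups min_preamble (find_data_start_py groups min_preamble)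

-- ===== LEMMAS AND PROOFS =====

-- length of the maximal preamble run ending just before index k
def fdsRunlen (groups : List Int) : Nat → Nat
  | 0 => 0
  | k + 1 => if fdsPreB (groups.getD k 0) then fdsRunlen groups k + 1 else 0

-- canonical middle form: first index j ≥ k (below the length) that is non-preamble
-- with a preceding preamble run of length ≥ m
def fdsFind (groups : List Int) (m : Int) (k : Nat) : Option Int :=
  ((List.range' k (groups.length - k)).find?
    (fun j => !fdsPreB (groups.getD j 0) && decide (m ≤ (fdsRunlen groups j : Int)))).map
    (fun j => (j : Int))

theorem fdsRunlen_le (groups : List Int) : ∀ k, fdsRunlen groups k ≤ k := by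
  intro k
  induction k with
  | zero => simp [fdsRunlen]
  | succ t ih =>
    simp only [fdsRunlen]
    split <;> omega

theorem fds_drop_head (groups : List Int) (k : Nat) (g : Int) (rest : List Int)
    (h : groups.drop k = g :: rest) :
    k < groups.length ∧ groups[k]? = some g ∧ groups.drop (k + 1) = rest := by
  have hlt : k < groups.length := by
    by_contra hc
    rw [List.drop_eq_nil_iff.mpr (by omega)] at h
    simp at h
  refine ⟨hlt, ?_, ?_⟩
  · have h1 : (groups.drop k).head? = some g := by rw [h]; rfl
    rw [List.head?_drop] at h1
    exact h1
  · have h2 := congrArg List.tail h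
    simpa [List.tail_drop] using h2

-- run length ≥ mn iff the mn positions before k are all preamble
theorem fdsR_iff (groups : List Int) : ∀ (mn k : Nat), mn ≤ k →
    ((mn ≤ fdsRunlen groups k) ↔
      ∀ j, k - mn ≤ j → j < k → fdsPreB (groups.getD j 0) = true) := by
  intro mn
  induction mn with
  | zero =>
    intro k _
    constructor
    · intro _ j h1 h2; omega
    · intro _; exact Nat.zero_le _
  | succ m ih =>
    intro k hk
    cases k with
    | zero => omega
    | succ t =>
      have hmt : m ≤ t := by omega
      by_cases hp : fdsPreB (groups.getD t 0) = true
      · have hrl : fdsRunlen groups (t + 1) = fdsRunlen groups t + 1 := by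
          simp only [fdsRunlen]; rw [hp]; simp
        rw [hrl]
        constructor
        · intro hle j h1 h2
          by_cases hjt : j = t
          · rw [hjt]; exact hp
          · exact (ih t hmt).mp (by omega) j (by omega) (by omega)
        · intro hall
          have : m ≤ fdsRunlen groups t :=
            (ih t hmt).mpr (fun j h1 h2 => hall j (by omega) (by omega))
          omega
      · have hrl : fdsRunlen groups (t + 1) = 0 := by
          simp only [fdsRunlen, if_neg hp]
        rw [hrl]
        constructor
        · intro hle; omega
        · intro hall
          exact absurd (hall t (by omega) (by omega)) hp

-- 'all' over a drop/take window iff the pointwise statement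
theorem fdsAll_iff (groups : List Int) : ∀ (mn a : Nat), a + mn ≤ groups.length →
    (((groups.drop a).take mn).all fdsPreB = true ↔
      ∀ j, a ≤ j → j < a + mn → fdsPreB (groups.getD j 0) = true) := by
  intro mn
  induction mn with
  | zero =>
    intro a _
    constructor
    · intro _ j h1 h2; omega
    · intro _; simp
  | succ m ih =>
    intro a ha
    have hlt : a < groups.length := by omega
    rw [List.drop_eq_getElem_cons hlt, List.take_succ_cons, List.all_cons]
    have hgd : groups.getD a 0 = groups[a] := by
      simp [List.getD, List.getElem?_eq_getElem hlt]
    have hrec := ih (a + 1) (by omega)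
    constructor
    · intro hand j h1 h2
      have h3 := Bool.and_eq_true_iff.mp hand
      by_cases hja : j = a
      · rw [hja, hgd]; exact h3.1
      · exact hrec.mp h3.2 j (by omega) (by omega)
    · intro hall
      refine Bool.and_eq_true_iff.mpr ⟨?_, ?_⟩
      · rw [← hgd]; exact hall a (le_refl a) (by omega)
      · exact hrec.mpr (fun j h1 h2 => hall j (by omega) (by omega))

theorem fds_window_eq (groups : List Int) (mn k : Nat) (h1 : mn ≤ k) (h2 : k ≤ groups.length) :
    ((groups.drop (k - mn)).take mn).all fdsPreB = decide (mn ≤ fdsRunlen groups k) := by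
  rw [Bool.eq_iff_iff]
  have hA := fdsAll_iff groups mn (k - mn) (by omega)
  rw [show k - mn + mn = k from by omega] at hA
  have hR := fdsR_iff groups mn k h1
  simp only [decide_eq_true_iff]
  exact hA.trans hR.symm

-- A's element scan, started at index k with counter = run length at k, computes fdsFind
theorem fdsA_loc (minp : Int) (groups : List Int) : ∀ (l : List Int) (k : Nat),
    groups.drop k = l →
    fdsA_loop minp l (k : Int) ((fdsRunlen groups k : Nat) : Int) =
      fdsFind groups (max minp 0) k := by
  intro l
  induction l with
  | nil =>
    intro k h
    have hlen : groups.length ≤ k := by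
      by_contra hc
      have := List.drop_eq_nil_iff.mp h
      omega
    simp [fdsA_loop, fdsFind, show groups.length - k = 0 from by omega]
  | cons g rest ih =>
    intro k h
    obtain ⟨hlt, hget, hdrop⟩ := fds_drop_head groups k g rest h
    have hgd : groups.getD k 0 = g := by rw [List.getD_eq_getElem?_getD, hget]; rfl
    have hrange : groups.length - k = (groups.length - (k + 1)) + 1 := by omega
    rw [fdsFind, hrange, List.range'_succ]
    by_cases hp : 8 ≤ g ∧ g ≤ 12
    · have hpre : fdsPreB g = true := by simp [fdsPreB, hp]
      have hrl : fdsRunlen groups (k + 1) = fdsRunlen groups k + 1 := by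
        simp only [fdsRunlen]; rw [hgd, hpre]; simp
      rw [show fdsA_loop minp (g :: rest) (k : Int) ((fdsRunlen groups k : Nat) : Int)
            = fdsA_loop minp rest ((k : Int) + 1) (((fdsRunlen groups k : Nat) : Int) + 1)
          from by simp [fdsA_loop, hp]]
      rw [List.find?_cons_of_neg (by rw [List.getD_eq_getElem?_getD, hget]; simp [hpre])]
      have := ih (k + 1) hdrop
      rw [fdsFind, hrl] at this
      rw [show ((k : Int) + 1) = ((k + 1 : Nat) : Int) from by push_cast; ring,
        show (((fdsRunlen groups k : Nat) : Int) + 1) = ((fdsRunlen groups k + 1 : Nat) : Int)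
          from by push_cast; ring]
      exact this
    · have hpre : fdsPreB g = false := by simp [fdsPreB, hp]
      have hrl : fdsRunlen groups (k + 1) = 0 := by
        simp only [fdsRunlen]; rw [hgd, hpre]; simp
      by_cases hret : minp ≤ ((fdsRunlen groups k : Nat) : Int)
      · have hmax : max minp 0 ≤ ((fdsRunlen groups k : Nat) : Int) := by
          rw [max_le_iff]
          exact ⟨hret, Int.natCast_nonneg _⟩
        rw [show fdsA_loop minp (g :: rest) (k : Int) ((fdsRunlen groups k : Nat) : Int)
              = some (k : Int) from by simp [fdsA_loop, hp, hret]]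
        rw [List.find?_cons_of_pos (by rw [List.getD_eq_getElem?_getD, hget]; simp [hpre, hmax])]
        rfl
      · have hmax : ¬ (max minp 0 ≤ ((fdsRunlen groups k : Nat) : Int)) := by
          intro hc
          exact hret (le_trans (le_max_left minp 0) hc)
        rw [show fdsA_loop minp (g :: rest) (k : Int) ((fdsRunlen groups k : Nat) : Int)
              = fdsA_loop minp rest ((k : Int) + 1) 0 from by simp [fdsA_loop, hp, hret]]
        rw [List.find?_cons_of_neg (by rw [List.getD_eq_getElem?_getD, hget]; simp [hpre, hmax])]
        have := ih (k + 1) hdrop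
        rw [fdsFind, hrl] at this
        rw [show ((k : Int) + 1) = ((k + 1 : Nat) : Int) from by push_cast; ring,
          show (0 : Int) = ((0 : Nat) : Int) from rfl]
        exact this

-- B's window scan, started at index k, computes fdsFind
theorem fdsB_loc (groups : List Int) (m : Int) (hm : 0 ≤ m) : ∀ (l : List Int) (k : Nat),
    groups.drop k = l →
    fdsB_loop groups m l (k : Int) = fdsFind groups m k := by
  intro l
  induction l with
  | nil =>
    intro k h
    have hlen : groups.length ≤ k := by
      by_contra hc
      have := List.drop_eq_nil_iff.mp h
      omega
    simp [fdsB_loop, fdsFind, show groups.length - k = 0 from by omega]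
  | cons g rest ih =>
    intro k h
    obtain ⟨hlt, hget, hdrop⟩ := fds_drop_head groups k g rest h
    have hgd : groups.getD k 0 = g := by rw [List.getD_eq_getElem?_getD, hget]; rfl
    have hrange : groups.length - k = (groups.length - (k + 1)) + 1 := by omega
    rw [fdsFind, hrange, List.range'_succ]
    have hcond : (!fdsPreB g && decide (m ≤ (k : Int))
        && (PySem.List.slice groups (some ((k : Int) - m)) (some (k : Int))).all fdsPreB)
        = (!fdsPreB (groups.getD k 0) && decide (m ≤ (fdsRunlen groups k : Int))) := by
      rw [hgd]
      by_cases hmk : m ≤ (k : Int)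
      · have hmn : m.toNat ≤ k := by omega
        have hslice : PySem.List.slice groups (some ((k : Int) - m)) (some (k : Int))
            = (groups.drop (k - m.toNat)).take m.toNat := by
          rw [PySem.List.slice_toNat groups (by omega) (Int.natCast_nonneg k)]
          rw [show ((k : Int) - m).toNat = k - m.toNat from by omega,
            show ((k : Int)).toNat = k from by omega,
            show k - (k - m.toNat) = m.toNat from by omega]
        rw [hslice, fds_window_eq groups m.toNat k hmn (by omega)]
        rw [decide_eq_true hmk, Bool.and_true]
        congr 1
        exact decide_eq_decide.mpr (by omega)
      · have hrun : ¬ (m ≤ (fdsRunlen groups k : Int)) := by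
          have := fdsRunlen_le groups k
          omega
        rw [decide_eq_false hmk, decide_eq_false hrun]
        simp
    by_cases hc : (!fdsPreB (groups.getD k 0) && decide (m ≤ (fdsRunlen groups k : Int))) = true
    · rw [show fdsB_loop groups m (g :: rest) (k : Int) = some (k : Int) from by
        simp only [fdsB_loop]; rw [if_pos (hcond.trans hc)]]
      rw [List.find?_cons_of_pos
        (p := fun j => !fdsPreB (groups.getD j 0) && decide (m ≤ (fdsRunlen groups j : Int))) hc]
      rfl
    · rw [show fdsB_loop groups m (g :: rest) (k : Int)
          = fdsB_loop groups m rest ((k : Int) + 1) from by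
        simp only [fdsB_loop]; rw [if_neg (by rw [hcond]; exact hc)]]
      rw [List.find?_cons_of_neg
        (p := fun j => !fdsPreB (groups.getD j 0) && decide (m ≤ (fdsRunlen groups j : Int)))
        (by simpa using hc)]
      rw [show ((k : Int) + 1) = ((k + 1 : Nat) : Int) from by push_cast; ring]
      rw [ih (k + 1) hdrop, fdsFind]

-- ===== VERDICT (by name: the statement is the Claim_ definition above) =====
theorem find_data_start_py_spec : Claim_equal_find_data_start_py := by
  intro groups minp _
  unfold Spec_find_data_start_py find_data_start_py find_data_start_py_alt
  have hA := fdsA_loc minp groups groups 0 (by simp : groups.drop 0 = groups)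
  have hB := fdsB_loc groups (max minp 0) (le_max_right minp 0) groups 0 (by simp : groups.drop 0 = groups)
  simp only [Nat.cast_zero] at hA hB
  rw [show fdsRunlen groups 0 = 0 from rfl, Nat.cast_zero] at hA
  rw [hA, hB]
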